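-- pv_equiv track=rewrite | github.com/erdenebayrd/leetcode | 3825-longest-strictly-increasing-subsequence-with-non-zero-bitwise-and/3825-longest-strictly-increasing-subsequence-with-non-zero-bitwise-and.py | longestSubsequence
-- ===== SOURCE A (Python) =====
-- from typing import List
--
-- def longestSubsequence(nums: List[int]) -> int:
--     def longesIncreasingSubsequence(arr: List[int]) -> int:
--         if len(arr) == 0:
--             return 0
--         subArray = [arr[0]]
--         for i in range(1, len(arr)):
--             if arr[i] > subArray[-1]:
--                 subArray.append(arr[i])
--             else:
--                 lo, hi = -1, len(subArray)
--                 while lo + 1 < hi: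
--                     md = (lo + hi) // 2
--                     if arr[i] <= subArray[md]:
--                         hi = md
--                     else:
--                         lo = md
--                 subArray[hi] = arr[i]
--         return len(subArray)
--
--     n = len(nums)
--     res = 0
--     for bit in range(32):
--         cur = []
--         for i in range(n):
--             if (nums[i] >> bit) & 1:
--                 cur.append(nums[i])
--         res = max(res, longesIncreasingSubsequence(cur))
--     return res
-- ===== SOURCE B (Python) =====
-- from typing import List
--
-- def longestSubsequence(nums: List[int]) -> int:
--     def best_ending_before(dp, x):
--         # longest LIS length achievable by appending x: 1 + best dp among values < x
--         best = 1
--         for v, d in dp: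
--             if v < x:
--                 best = max(best, d + 1)
--         return best
--
--     def lis(arr):
--         # classic O(n^2) dynamic programming: dp holds (value, LIS length ending at it)
--         dp = []
--         for x in arr:
--             dp.append((x, best_ending_before(dp, x)))
--         return max((d for _, d in dp), default=0)
--
--     best = 0
--     for bit in range(32):
--         cur = [x for x in nums if (x >> bit) & 1]
--         best = max(best, lis(cur))
--     return best
-- ===== Notes on version B (the rewrite author's own statement) =====
-- stated objective: alternative
-- what changed: B replaces A's patience-sorting LIS helper (tails array maintained with binary search) by the classic O(n^2) dynamic programming LIS that stores, for each element of the filtered array, the length of the longest increasing subsequence ending there, per bit.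
import Mathlib
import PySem

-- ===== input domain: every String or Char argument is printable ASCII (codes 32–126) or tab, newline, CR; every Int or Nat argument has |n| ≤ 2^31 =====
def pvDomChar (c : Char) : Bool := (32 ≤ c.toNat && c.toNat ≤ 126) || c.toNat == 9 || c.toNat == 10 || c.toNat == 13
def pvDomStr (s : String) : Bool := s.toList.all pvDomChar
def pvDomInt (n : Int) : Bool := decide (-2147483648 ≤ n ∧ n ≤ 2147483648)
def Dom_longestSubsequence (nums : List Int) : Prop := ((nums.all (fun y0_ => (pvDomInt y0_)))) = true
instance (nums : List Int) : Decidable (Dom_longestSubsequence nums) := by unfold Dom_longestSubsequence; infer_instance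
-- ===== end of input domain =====

-- One honest line: B replaces A's patience-sorting LIS helper (sorted tails + binary search)
-- by the classic O(n^2) dynamic-programming LIS (length of LIS ending at each element), per bit.

-- ===== PORT A =====

-- Python's (x >> bit) & 1 truthiness test (shared bit predicate of both programs)
def pvBit (x bit : Int) : Bool := PySem.Int.band (x >>> bit.toNat) 1 ≠ 0

-- the 'while lo + 1 < hi' binary-search loop of A's helper; sub[md] is always in range
-- when called as A calls it, so the .getD 0 default is never the value used
def bsLoop (x : Int) (sub : List Int) (lo hi : Int) : Int :=
  if _h : lo + 1 < hi then
    if x ≤ PySem.List.pyGetD sub (PySem.Int.floordiv (lo + hi) 2) 0 then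
      bsLoop x sub lo (PySem.Int.floordiv (lo + hi) 2)
    else bsLoop x sub (PySem.Int.floordiv (lo + hi) 2) hi
  else hi
termination_by (hi - lo).toNat
decreasing_by
  · have h1 := (PySem.Int.le_floordiv_iff_mul_le (a := lo + hi) (b := 2) (q := lo + 1) (by omega)).mpr (by omega)
    have h2 := (PySem.Int.floordiv_lt_iff_lt_mul (a := lo + hi) (b := 2) (q := hi) (by omega)).mpr (by omega)
    omega
  · have h2 := (PySem.Int.floordiv_lt_iff_lt_mul (a := lo + hi) (b := 2) (q := hi) (by omega)).mpr (by omega)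
    have h1 := (PySem.Int.le_floordiv_iff_mul_le (a := lo + hi) (b := 2) (q := lo + 1) (by omega)).mpr (by omega)
    omega

-- body of A's per-element step on subArray (append, or overwrite at the binary-search index;
-- the index is provably ≥ 0 in every reachable call, so pySetD is exact)
def aStep (sub : List Int) (x : Int) : List Int :=
  if PySem.List.pyGetD sub (-1) 0 < x then sub ++ [x]
  else PySem.List.pySetD sub (bsLoop x sub (-1) (PySem.List.len sub)) x

-- A's helper longesIncreasingSubsequence
def lisA (arr : List Int) : Int :=
  if arr.length = 0 then 0
  else
    let sub0 : List Int := [PySem.List.pyGetD arr 0 0]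
    let subF := (PySem.List.pyRange 1 (PySem.List.len arr) 1).foldl
      (fun sub i => aStep sub (PySem.List.pyGetD arr i 0)) sub0
    Int.ofNat subF.length

def longestSubsequence (nums : List Int) : Int :=
  (PySem.List.pyRange 0 32 1).foldl
    (fun res bit =>
      let cur := nums.foldl (fun c v => if pvBit v bit then c ++ [v] else c) []
      max res (lisA cur))
    0

-- ===== PORT B =====

-- Source B's best_ending_before: 1 + best dp value among entries with value < x (linear scan)
def bestB (dp : List (Int × Int)) (x : Int) : Int :=
  dp.foldl (fun best p => if p.1 < x then max best (p.2 + 1) else best) 1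

-- Source B's lis: dynamic programming, dp = list of (value, LIS length ending at that value)
def lisB (arr : List Int) : Int :=
  let dp := arr.foldl (fun dp x => dp ++ [(x, bestB dp x)]) ([] : List (Int × Int))
  match dp.map Prod.snd with
  | [] => 0
  | h :: t => t.foldl max h

def longestSubsequence_alt (nums : List Int) : Int :=
  (PySem.List.pyRange 0 32 1).foldl
    (fun best bit => max best (lisB (nums.filter (fun x => pvBit x bit))))
    0

-- ===== PRECONDITION & SPEC =====
def Spec_longestSubsequence (nums : List Int) (out : Int) : Prop := out = longestSubsequence_alt nums
instance (nums : List Int) (out : Int) : Decidable (Spec_longestSubsequence nums out) := by unfold Spec_longestSubsequence; infer_instance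

-- ===== CLAIM (what is proved, stated in full; the proofs are below) =====
def Claim_equal_longestSubsequence : Prop := ∀ (nums : List Int), Dom_longestSubsequence nums → Spec_longestSubsequence nums (longestSubsequence nums)

-- ===== LEMMAS AND PROOFS =====

-- ---- A side: the patience fold computed by lisA ----

-- linear-scan insertion into a sorted tails list: abstract form of A's per-element step
def insertTail (x : Int) : List Int → List Int
  | [] => [x]
  | t :: ts => if t < x then t :: insertTail x ts else x :: ts

def tailsOf (l : List Int) : List Int := l.foldl (fun s x => insertTail x s) []

lemma mem_insertTail {y x : Int} : ∀ {t : List Int}, y ∈ insertTail x t → y = x ∨ y ∈ t := by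
  intro t
  induction t with
  | nil => simp [insertTail]
  | cons a ts ih =>
    simp only [insertTail]
    split
    · intro h
      rcases List.mem_cons.mp h with h | h
      · exact Or.inr (by simp [h])
      · rcases ih h with h | h
        · exact Or.inl h
        · exact Or.inr (List.mem_cons_of_mem _ h)
    · intro h
      rcases List.mem_cons.mp h with h | h
      · exact Or.inl h
      · exact Or.inr (List.mem_cons_of_mem _ h)

lemma insertTail_sorted {x : Int} : ∀ {t : List Int}, t.Pairwise (· < ·) →
    (insertTail x t).Pairwise (· < ·) := by
  intro t
  induction t with
  | nil => intro _; simp [insertTail]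
  | cons a ts ih =>
    intro h
    rcases List.pairwise_cons.mp h with ⟨ha, hts⟩
    simp only [insertTail]
    split
    · rename_i hax
      refine List.pairwise_cons.mpr ⟨?_, ih hts⟩
      intro y hy
      rcases mem_insertTail hy with rfl | hy
      · exact hax
      · exact ha y hy
    · rename_i hax
      refine List.pairwise_cons.mpr ⟨?_, hts⟩
      intro y hy
      exact lt_of_le_of_lt (not_lt.mp hax) (ha y hy)

lemma insertTail_ne_nil {x : Int} {t : List Int} : insertTail x t ≠ [] := by
  cases t with
  | nil => simp [insertTail]
  | cons a ts => simp only [insertTail]; split <;> simp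

lemma insertTail_eq_append {x : Int} : ∀ {t : List Int}, (∀ y ∈ t, y < x) →
    insertTail x t = t ++ [x] := by
  intro t
  induction t with
  | nil => intro _; rfl
  | cons a ts ih =>
    intro h
    simp only [insertTail]
    rw [if_pos (h a (by simp)), ih (fun y hy => h y (by simp [hy]))]
    rfl

lemma insertTail_eq_set {x : Int} : ∀ {t : List Int}, t.Pairwise (· < ·) → (∃ y ∈ t, ¬ y < x) →
    insertTail x t = t.set (t.countP (fun y => decide (y < x))) x := by
  intro t
  induction t with
  | nil => intro _ hex; simp at hex
  | cons a ts ih =>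
    intro hp hex
    rcases List.pairwise_cons.mp hp with ⟨ha, hts⟩
    by_cases hax : a < x
    · obtain ⟨y, hy, hyx⟩ := hex
      have hy' : y ∈ ts := by
        rcases List.mem_cons.mp hy with rfl | h
        · exact absurd hax hyx
        · exact h
      simp only [insertTail]
      rw [if_pos hax, List.countP_cons_of_pos (by simpa using hax),
        ih hts ⟨y, hy', hyx⟩]
      rfl
    · simp only [insertTail]
      rw [if_neg hax]
      have h0 : ts.countP (fun y => decide (y < x)) = 0 := by
        rw [List.countP_eq_zero]
        intro y hy
        simp only [decide_eq_true_eq, not_lt]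
        exact le_trans (not_lt.mp hax) (le_of_lt (ha y hy))
      rw [List.countP_cons_of_neg (by simpa using hax), h0]
      rfl

lemma countP_eq_of_split (x : Int) : ∀ (t : List Int) (h : Nat), h ≤ t.length →
    (∀ (i : Nat) (hi : i < t.length), i < h → t[i] < x) →
    (∀ (i : Nat) (hi : i < t.length), h ≤ i → x ≤ t[i]) →
    t.countP (fun y => decide (y < x)) = h := by
  intro t
  induction t with
  | nil =>
    intro h hle _ _
    simp at hle
    simp [hle]
  | cons a ts ih =>
    intro h hle hlt hge
    cases h with
    | zero =>
      rw [List.countP_eq_zero.mpr ?_]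
      intro y hy
      obtain ⟨i, hi, rfl⟩ := List.mem_iff_getElem.mp hy
      simp only [decide_eq_true_eq, not_lt]
      exact hge i hi (Nat.zero_le _)
    | succ h' =>
      have ha : a < x := by simpa using hlt 0 (by simp) (Nat.succ_pos _)
      rw [List.countP_cons_of_pos (by simpa using ha),
        ih h' (by simpa using hle)
          (fun i hi hih => by simpa using hlt (i + 1) (by simpa using hi) (by omega))
          (fun i hi hih => by simpa using hge (i + 1) (by simpa using hi) (by omega))]

-- monotone access into a strictly sorted list
lemma sorted_getElem_le {s : List Int} (hs : s.Pairwise (· < ·)) {i j : Nat} (hij : i ≤ j)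
    (hj : j < s.length) : s[i]'(lt_of_le_of_lt hij hj) ≤ s[j] := by
  rcases Nat.lt_or_ge i j with h | h
  · exact le_of_lt (List.pairwise_iff_getElem.mp hs i j (by omega) hj h)
  · have : i = j := by omega
    subst this
    exact le_refl _

lemma sorted_le_getLast {s : List Int} (hs : s.Pairwise (· < ·)) (hne : s ≠ []) :
    ∀ y ∈ s, y ≤ s.getLast hne := by
  intro y hy
  obtain ⟨i, hi, rfl⟩ := List.mem_iff_getElem.mp hy
  rw [List.getLast_eq_getElem]
  exact sorted_getElem_le hs (by omega) (by omega)

lemma bsLoop_eq_countP (x : Int) (s : List Int) (hs : s.Pairwise (· < ·)) :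
    ∀ (n : Nat) (lo hi : Int), (hi - lo).toNat ≤ n → -1 ≤ lo → lo < hi → hi ≤ (s.length : Int) →
    (∀ (i : Nat) (hi_ : i < s.length), (i : Int) ≤ lo → s[i] < x) →
    (∀ (i : Nat) (hi_ : i < s.length), hi ≤ (i : Int) → x ≤ s[i]) →
    bsLoop x s lo hi = ((s.countP (fun y => decide (y < x)) : Nat) : Int) := by
  intro n
  induction n with
  | zero => intro lo hi hn h0 h1; omega
  | succ n ih =>
    intro lo hi hn h0 h1 h2 hlo hhi
    rw [bsLoop]
    split
    · rename_i hlt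
      have hmd1 : lo + 1 ≤ PySem.Int.floordiv (lo + hi) 2 :=
        (PySem.Int.le_floordiv_iff_mul_le (by omega)).mpr (by omega)
      have hmd2 : PySem.Int.floordiv (lo + hi) 2 < hi :=
        (PySem.Int.floordiv_lt_iff_lt_mul (by omega)).mpr (by omega)
      set md := PySem.Int.floordiv (lo + hi) 2 with hmd
      rw [PySem.List.pyGetD_eq_getElem s 0 (by omega) (by omega)]
      split
      · rename_i hxle
        apply ih lo md (by omega) h0 (by omega) (by omega) hlo
        intro i hi_ hge
        refine le_trans hxle (sorted_getElem_le hs (i := md.toNat) (by omega) hi_)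
      · rename_i hxgt
        apply ih md hi (by omega) (by omega) (by omega) h2 _ hhi
        intro i hi_ hle
        have hmem : s[i] ≤ s[md.toNat]'(by omega) :=
          sorted_getElem_le hs (by omega) (by omega)
        exact lt_of_le_of_lt hmem (not_le.mp hxgt)
    · rename_i hge
      have hhieq : hi = lo + 1 := by omega
      have hcnt : s.countP (fun y => decide (y < x)) = hi.toNat := by
        apply countP_eq_of_split x s hi.toNat (by omega)
        · intro i hilen hih
          exact hlo i hilen (by omega)
        · intro i hilen hih
          exact hhi i hilen (by omega)
      rw [hcnt]
      omega

lemma aStep_eq_insertTail {s : List Int} (hs : s.Pairwise (· < ·)) (hne : s ≠ []) (x : Int) :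
    aStep s x = insertTail x s := by
  unfold aStep
  rw [PySem.List.pyGetD_neg_one s 0 hne]
  by_cases hlt : s.getLast hne < x
  · rw [if_pos hlt,
      insertTail_eq_append (fun y hy => lt_of_le_of_lt (sorted_le_getLast hs hne y hy) hlt)]
  · rw [if_neg hlt]
    have hbs : bsLoop x s (-1) (PySem.List.len s)
        = ((s.countP (fun y => decide (y < x)) : Nat) : Int) := by
      rw [PySem.List.len_eq]
      apply bsLoop_eq_countP x s hs (s.length + 1) (-1) _ (by omega) (by omega) (by omega) (by omega)
      · intro i hi_ hle
        exfalso
        omega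
      · intro i hi_ hge
        exfalso
        omega
    rw [hbs, PySem.List.pySetD_natCast]
    exact (insertTail_eq_set hs ⟨s.getLast hne, List.getLast_mem hne, hlt⟩).symm

lemma foldl_aStep_eq : ∀ (rest s : List Int), s.Pairwise (· < ·) → s ≠ [] →
    rest.foldl aStep s = rest.foldl (fun s x => insertTail x s) s := by
  intro rest
  induction rest with
  | nil => intro s _ _; rfl
  | cons x rest ih =>
    intro s hs hne
    simp only [List.foldl_cons]
    rw [aStep_eq_insertTail hs hne x]
    exact ih _ (insertTail_sorted hs) insertTail_ne_nil

lemma lisA_eq (arr : List Int) : lisA arr = Int.ofNat (tailsOf arr).length := by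
  cases arr with
  | nil => rfl
  | cons a rest =>
    simp only [lisA, tailsOf]
    rw [if_neg (by simp)]
    rw [PySem.List.pyGetD_zero_cons a rest 0]
    rw [PySem.List.foldl_pyRange_pyGetD (a :: rest) 0 aStep [a] (by omega)]
    simp only [Int.toNat_one, List.drop_succ_cons, List.drop_zero, List.foldl_cons]
    rw [foldl_aStep_eq rest [a] (by simp) (by simp)]
    rfl

-- ---- B side: the DP fold and its relation to the patience tails ----

-- max dp value among entries with value < y, 0 if none
def mb (dp : List (Int × Int)) (y : Int) : Int :=
  dp.foldl (fun b p => if p.1 < y then max b p.2 else b) 0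

-- max of all dp values, 0 if none
def M (dp : List (Int × Int)) : Int := (dp.map Prod.snd).foldl max 0

def dpB (l : List Int) : List (Int × Int) :=
  l.foldl (fun dp x => dp ++ [(x, bestB dp x)]) []

-- the count of tails elements < y, as an Int
def cnt (t : List Int) (y : Int) : Int := (t.countP (fun v => decide (v < y)) : Nat)

lemma bestB_shift (x : Int) : ∀ (dp : List (Int × Int)) (c : Int),
    dp.foldl (fun b p => if p.1 < x then max b (p.2 + 1) else b) (c + 1)
      = dp.foldl (fun b p => if p.1 < x then max b p.2 else b) c + 1 := by
  intro dp
  induction dp with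
  | nil => intro c; rfl
  | cons p dp ih =>
    intro c
    simp only [List.foldl_cons]
    by_cases h : p.1 < x
    · rw [if_pos h, if_pos h]
      have hmx : max (c + 1) (p.2 + 1) = max c p.2 + 1 := by omega
      rw [hmx, ih]
    · rw [if_neg h, if_neg h, ih]

lemma bestB_eq_mb (dp : List (Int × Int)) (x : Int) : bestB dp x = mb dp x + 1 := by
  have := bestB_shift x dp 0
  simpa [bestB, mb] using this

lemma cnt_nil (y : Int) : cnt [] y = 0 := rfl

lemma cnt_cons (a : Int) (t : List Int) (y : Int) :
    cnt (a :: t) y = (if a < y then 1 else 0) + cnt t y := by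
  unfold cnt
  by_cases h : a < y
  · rw [List.countP_cons_of_pos (by simpa using h)]
    simp [h]
    omega
  · rw [List.countP_cons_of_neg (by simpa using h)]
    simp [h]

lemma cnt_tail_zero {a z : Int} {ts : List Int} (ha : ∀ v ∈ ts, a < v) (hz : z ≤ a) :
    cnt ts z = 0 := by
  unfold cnt
  rw [List.countP_eq_zero.mpr]
  · rfl
  · intro v hv
    simp only [decide_eq_true_eq, not_lt]
    exact le_trans hz (le_of_lt (ha v hv))

lemma cnt_insertTail (x y : Int) : ∀ {t : List Int}, t.Pairwise (· < ·) →
    cnt (insertTail x t) y = if x < y then max (cnt t y) (cnt t x + 1) else cnt t y := by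
  intro t
  induction t with
  | nil =>
    intro _
    by_cases h : x < y <;> simp [insertTail, cnt_cons, cnt_nil, h]
  | cons a ts ih =>
    intro hp
    rcases List.pairwise_cons.mp hp with ⟨ha, hts⟩
    by_cases hax : a < x
    · simp only [insertTail, if_pos hax]
      rw [cnt_cons, ih hts]
      by_cases hxy : x < y
      · have hay : a < y := lt_trans hax hxy
        rw [if_pos hxy, if_pos hxy, cnt_cons, cnt_cons, if_pos hay, if_pos hax]
        omega
      · rw [if_neg hxy, if_neg hxy, cnt_cons]
    · simp only [insertTail, if_neg hax]
      have hxa : x ≤ a := not_lt.mp hax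
      have h0x : cnt ts x = 0 := cnt_tail_zero ha hxa
      have hny : 0 ≤ cnt ts y := Int.natCast_nonneg _
      by_cases hxy : x < y
      · rw [if_pos hxy, cnt_cons x ts y, if_pos hxy, cnt_cons a ts y,
          cnt_cons a ts x, if_neg hax, h0x]
        by_cases hay : a < y
        · rw [if_pos hay]
          omega
        · rw [if_neg hay, cnt_tail_zero ha (not_lt.mp hay)]
          omega
      · have hya : y ≤ a := le_trans (not_lt.mp hxy) hxa
        rw [if_neg hxy, cnt_cons x ts y, if_neg hxy, cnt_cons a ts y,
          if_neg (not_lt.mpr hya), cnt_tail_zero ha hya]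

lemma cnt_le_len (t : List Int) (y : Int) : cnt t y ≤ (t.length : Int) := by
  unfold cnt
  exact_mod_cast List.countP_le_length (l := t)

lemma len_insertTail (x : Int) : ∀ {t : List Int}, t.Pairwise (· < ·) →
    ((insertTail x t).length : Int) = max (t.length : Int) (cnt t x + 1) := by
  intro t
  induction t with
  | nil => intro _; simp [insertTail, cnt_nil]
  | cons a ts ih =>
    intro hp
    rcases List.pairwise_cons.mp hp with ⟨ha, hts⟩
    by_cases hax : a < x
    · simp only [insertTail, if_pos hax]
      have := ih hts
      rw [cnt_cons, if_pos hax]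
      simp only [List.length_cons]
      push_cast
      rw [this]
      omega
    · simp only [insertTail, if_neg hax]
      rw [cnt_cons, if_neg hax, cnt_tail_zero ha (not_lt.mp hax)]
      simp only [List.length_cons]
      have := cnt_le_len ts x
      omega

lemma mb_append (dp : List (Int × Int)) (x d y : Int) :
    mb (dp ++ [(x, d)]) y = if x < y then max (mb dp y) d else mb dp y := by
  simp [mb, List.foldl_append]

lemma M_append (dp : List (Int × Int)) (x d : Int) :
    M (dp ++ [(x, d)]) = max (M dp) d := by
  simp [M, List.foldl_append]

-- the joint invariant linking A's tails and B's dp table, by snoc induction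
lemma tails_dp_inv (l : List Int) :
    (tailsOf l).Pairwise (· < ·) ∧
    (∀ y : Int, cnt (tailsOf l) y = mb (dpB l) y) ∧
    ((tailsOf l).length : Int) = M (dpB l) := by
  induction l using List.reverseRecOn with
  | nil => exact ⟨by simp [tailsOf], fun y => rfl, rfl⟩
  | append_singleton l x ih =>
    obtain ⟨hs, hcnt, hlen⟩ := ih
    have ht : tailsOf (l ++ [x]) = insertTail x (tailsOf l) := by
      simp [tailsOf, List.foldl_append]
    have hd : dpB (l ++ [x]) = dpB l ++ [(x, bestB (dpB l) x)] := by
      simp [dpB, List.foldl_append]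
    refine ⟨ht ▸ insertTail_sorted hs, ?_, ?_⟩
    · intro y
      rw [ht, hd, cnt_insertTail x y hs, mb_append, bestB_eq_mb, ← hcnt y, ← hcnt x]
    · rw [ht, hd, len_insertTail x hs, M_append, bestB_eq_mb, ← hcnt x, hlen]

lemma mb_nonneg (dp : List (Int × Int)) (y : Int) : 0 ≤ mb dp y := by
  unfold mb
  suffices h : ∀ c : Int, 0 ≤ c →
      0 ≤ dp.foldl (fun b p => if p.1 < y then max b p.2 else b) c by
    exact h 0 le_rfl
  induction dp with
  | nil => intro c hc; exact hc
  | cons p dp ih =>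
    intro c hc
    simp only [List.foldl_cons]
    by_cases h : p.1 < y
    · rw [if_pos h]; exact ih _ (le_trans hc (le_max_left _ _))
    · rw [if_neg h]; exact ih _ hc

lemma snd_dpB_nonneg (l : List Int) : ∀ p ∈ dpB l, 0 ≤ p.2 := by
  induction l using List.reverseRecOn with
  | nil => intro p hp; simp [dpB] at hp
  | append_singleton l x ih =>
    intro p hp
    have hd : dpB (l ++ [x]) = dpB l ++ [(x, bestB (dpB l) x)] := by
      simp [dpB, List.foldl_append]
    rw [hd] at hp
    rcases List.mem_append.mp hp with h | h
    · exact ih p h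
    · have : p = (x, bestB (dpB l) x) := by simpa using h
      rw [this, bestB_eq_mb]
      have := mb_nonneg (dpB l) x
      omega

lemma foldl_max_from_head (a : Int) (t : List Int) (ha : 0 ≤ a) :
    t.foldl max a = (a :: t).foldl max 0 := by
  simp only [List.foldl_cons]
  rw [max_eq_right ha]

lemma lisB_eq (arr : List Int) : lisB arr = Int.ofNat (tailsOf arr).length := by
  obtain ⟨_, _, hlen⟩ := tails_dp_inv arr
  show (match (dpB arr).map Prod.snd with | [] => (0:Int) | h :: t => t.foldl max h)
      = Int.ofNat (tailsOf arr).length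
  cases hmap : (dpB arr).map Prod.snd with
  | nil =>
    have hM : M (dpB arr) = 0 := by unfold M; rw [hmap]; rfl
    rw [hM] at hlen
    show (0 : Int) = ((tailsOf arr).length : Int)
    omega
  | cons h t =>
    have hh : (0:Int) ≤ h := by
      have : h ∈ (dpB arr).map Prod.snd := by rw [hmap]; simp
      obtain ⟨p, hp, rfl⟩ := List.mem_map.mp this
      exact snd_dpB_nonneg arr p hp
    show t.foldl max h = Int.ofNat (tailsOf arr).length
    rw [foldl_max_from_head h t hh, ← hmap]
    rw [show ((dpB arr).map Prod.snd).foldl max 0 = M (dpB arr) from rfl, ← hlen]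
    rfl

-- ===== VERDICT (by name: the statement is the Claim_ definition above) =====
theorem longestSubsequence_spec : Claim_equal_longestSubsequence := by
  intro nums _
  unfold Spec_longestSubsequence longestSubsequence longestSubsequence_alt
  apply List.foldl_ext
  intro res bit _
  simp only [PySem.List.foldl_append_if, List.nil_append, List.map_id']
  rw [lisA_eq, lisB_eq]
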